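-- pv_equiv track=rewrite | github.com/mattdav/read_MRZ | read_id.py | replace_car
-- ===== SOURCE A (Python) =====
-- def replace_car(text, isNumeric):
--     Number_to_letter = {'0': 'O', '1': 'I', '2': 'Z', '4': 'A', '5': 'S', '6': 'G', '8': 'B', '<': ' '}
--     Letter_to_number = {'B': '8', 'C': '0', 'D': '0', 'G': '6', 'I': '1', 'O': '0', 'Q': '0', 'S': '5', 'Z': '2'}
--     if isNumeric == True:
--         for key in Letter_to_number.keys():
--             text = text.replace(key, Letter_to_number[key])
--     else:
--         for key in Number_to_letter.keys():
--             text = text.replace(key, Number_to_letter[key])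
--     return text
-- ===== SOURCE B (Python) =====
-- def replace_car(text, isNumeric):
--     Number_to_letter = {'0': 'O', '1': 'I', '2': 'Z', '4': 'A', '5': 'S', '6': 'G', '8': 'B', '<': ' '}
--     Letter_to_number = {'B': '8', 'C': '0', 'D': '0', 'G': '6', 'I': '1', 'O': '0', 'Q': '0', 'S': '5', 'Z': '2'}
--     mapping = Letter_to_number if isNumeric == True else Number_to_letter
--     return ''.join(mapping.get(ch, ch) for ch in text)
-- ===== Notes on version B (the rewrite author's own statement) =====
-- stated objective: alternative
-- what changed: A runs 8-9 whole-string .replace passes, one per mapping key; B selects the mapping dict once and builds the result in a single character-by-character pass with a per-character dict lookup (exact because no replacement value is itself a key). Asymptotically one pass instead of k, but CPython's C-level replace makes A faster in practice, so no speed is claimed.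
import Mathlib
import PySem

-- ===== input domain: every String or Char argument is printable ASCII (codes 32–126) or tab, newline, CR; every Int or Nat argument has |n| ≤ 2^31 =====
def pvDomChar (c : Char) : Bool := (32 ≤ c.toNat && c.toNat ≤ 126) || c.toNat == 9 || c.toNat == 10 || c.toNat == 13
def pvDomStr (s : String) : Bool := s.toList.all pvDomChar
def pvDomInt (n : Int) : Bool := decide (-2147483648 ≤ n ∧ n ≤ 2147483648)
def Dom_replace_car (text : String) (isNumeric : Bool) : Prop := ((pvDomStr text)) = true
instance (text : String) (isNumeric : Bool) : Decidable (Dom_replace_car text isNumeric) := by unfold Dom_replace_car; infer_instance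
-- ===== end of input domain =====

-- B replaces A's 8/9 whole-string .replace passes by one character-by-character pass over a lookup table; equivalence is proved for all inputs.

-- ===== PORT A =====
-- the two literal dicts of A (str -> str)
def pvN2L : PySem.Dict String String :=
  PySem.Dict.ofList [("0","O"),("1","I"),("2","Z"),("4","A"),("5","S"),("6","G"),("8","B"),("<"," ")]
def pvL2N : PySem.Dict String String :=
  PySem.Dict.ofList [("B","8"),("C","0"),("D","0"),("G","6"),("I","1"),("O","0"),("Q","0"),("S","5"),("Z","2")]

-- 'for key in D.keys(): text = text.replace(key, D[key])'; D[key] is a lookup of a key of D, so the total getD is exact here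
def replace_car (text : String) (isNumeric : Bool) : String :=
  if isNumeric == true then
    pvL2N.keys.foldl (fun t k => PySem.Str.replace t k (pvL2N.getD k "")) text
  else
    pvN2L.keys.foldl (fun t k => PySem.Str.replace t k (pvN2L.getD k "")) text

-- ===== PORT B =====
-- Source B iterates the characters of text; Python's 1-character strings are Lean Chars
def pvN2Lc : PySem.Dict Char Char :=
  PySem.Dict.ofList [('0','O'),('1','I'),('2','Z'),('4','A'),('5','S'),('6','G'),('8','B'),('<',' ')]
def pvL2Nc : PySem.Dict Char Char :=
  PySem.Dict.ofList [('B','8'),('C','0'),('D','0'),('G','6'),('I','1'),('O','0'),('Q','0'),('S','5'),('Z','2')]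

def replace_car_alt (text : String) (isNumeric : Bool) : String :=
  let mapping := if isNumeric == true then pvL2Nc else pvN2Lc
  String.ofList (text.toList.map (fun ch => mapping.getD ch ch))

-- ===== PRECONDITION & SPEC =====
def Spec_replace_car (text : String) (isNumeric : Bool) (out : String) : Prop := out = replace_car_alt text isNumeric
instance (text : String) (isNumeric : Bool) (out : String) : Decidable (Spec_replace_car text isNumeric out) := by unfold Spec_replace_car; infer_instance

-- ===== CLAIM (what is proved, stated in full; the proofs are below) =====
def Claim_equal_replace_car : Prop := ∀ (text : String) (isNumeric : Bool), Dom_replace_car text isNumeric → Spec_replace_car text isNumeric (replace_car text isNumeric)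

-- ===== LEMMAS AND PROOFS =====

-- replacing a single character by a single character is a pointwise map
lemma go_single (o n : Char) : ∀ (fuel : Nat) (l acc : List Char), l.length ≤ fuel →
    PySem.Chars.replace.go [o] [n] fuel l acc
      = acc.reverse ++ l.map (fun c => if c = o then n else c) := by
  intro fuel
  induction fuel with
  | zero =>
    intro l acc h
    cases l with
    | nil => simp [PySem.Chars.replace.go]
    | cons c t => simp at h
  | succ f ih =>
    intro l acc h
    cases l with
    | nil => simp [PySem.Chars.replace.go]
    | cons c t =>
      rw [show PySem.Chars.replace.go [o] [n] (f+1) (c :: t) acc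
            = if [o].isPrefixOf (c :: t) then
                PySem.Chars.replace.go [o] [n] f (List.drop 1 (c :: t)) ([n].reverse ++ acc)
              else PySem.Chars.replace.go [o] [n] f t (c :: acc) from rfl]
      by_cases hc : o = c
      · subst hc
        simp [List.isPrefixOf, ih t (n :: acc) (by simpa using h)]
      · have hb : [o].isPrefixOf (c :: t) = false := by simp [List.isPrefixOf, hc]
        rw [hb]
        simp [ih t (c :: acc) (by simpa using h), Ne.symm hc]

lemma replace_single (s : List Char) (o n : Char) :
    PySem.Chars.replace s [o] [n] = s.map (fun c => if c = o then n else c) := by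
  simp [PySem.Chars.replace, go_single o n s.length s [] le_rfl]

lemma str_replace_single (s : String) (old new : String) (o n : Char)
    (ho : old.toList = [o]) (hn : new.toList = [n]) :
    PySem.Str.replace s old new = String.ofList (s.toList.map (fun c => if c = o then n else c)) := by
  simp [PySem.Str.replace, ho, hn, replace_single]

-- ===== VERDICT (by name: the statement is the Claim_ definition above) =====
set_option maxHeartbeats 1000000 in
theorem replace_car_spec : Claim_equal_replace_car := by
  intro text isNumeric _
  unfold Spec_replace_car replace_car replace_car_alt
  cases isNumeric with
  | true =>
    have hk : pvL2N.keys = ["B","C","D","G","I","O","Q","S","Z"] := by decide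
    rw [hk]
    simp only [List.foldl]
    rw [show pvL2N.getD "B" "" = "8" from by decide, show pvL2N.getD "C" "" = "0" from by decide,
        show pvL2N.getD "D" "" = "0" from by decide, show pvL2N.getD "G" "" = "6" from by decide,
        show pvL2N.getD "I" "" = "1" from by decide, show pvL2N.getD "O" "" = "0" from by decide,
        show pvL2N.getD "Q" "" = "0" from by decide, show pvL2N.getD "S" "" = "5" from by decide,
        show pvL2N.getD "Z" "" = "2" from by decide]
    rw [str_replace_single _ "B" "8" 'B' '8' (by decide) (by decide),
        str_replace_single _ "C" "0" 'C' '0' (by decide) (by decide),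
        str_replace_single _ "D" "0" 'D' '0' (by decide) (by decide),
        str_replace_single _ "G" "6" 'G' '6' (by decide) (by decide),
        str_replace_single _ "I" "1" 'I' '1' (by decide) (by decide),
        str_replace_single _ "O" "0" 'O' '0' (by decide) (by decide),
        str_replace_single _ "Q" "0" 'Q' '0' (by decide) (by decide),
        str_replace_single _ "S" "5" 'S' '5' (by decide) (by decide),
        str_replace_single _ "Z" "2" 'Z' '2' (by decide) (by decide)]
    simp only [String.toList_ofList, List.map_map]
    refine congrArg String.ofList (List.map_congr_left ?_)
    intro c _
    by_cases h1 : c = 'B'; · subst h1; decide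
    by_cases h2 : c = 'C'; · subst h2; decide
    by_cases h3 : c = 'D'; · subst h3; decide
    by_cases h4 : c = 'G'; · subst h4; decide
    by_cases h5 : c = 'I'; · subst h5; decide
    by_cases h6 : c = 'O'; · subst h6; decide
    by_cases h7 : c = 'Q'; · subst h7; decide
    by_cases h8 : c = 'S'; · subst h8; decide
    by_cases h9 : c = 'Z'; · subst h9; decide
    have hm : pvL2Nc = PySem.Dict.mk [('B','8'),('C','0'),('D','0'),('G','6'),('I','1'),('O','0'),('Q','0'),('S','5'),('Z','2')] := by decide
    simp [h1, h2, h3, h4, h5, h6, h7, h8, h9, hm, PySem.Dict.getD, PySem.Dict.get?,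
      Ne.symm h1, Ne.symm h2, Ne.symm h3, Ne.symm h4, Ne.symm h5, Ne.symm h6,
      Ne.symm h7, Ne.symm h8, Ne.symm h9]
  | false =>
    have hk : pvN2L.keys = ["0","1","2","4","5","6","8","<"] := by decide
    rw [hk]
    simp only [List.foldl]
    rw [show pvN2L.getD "0" "" = "O" from by decide, show pvN2L.getD "1" "" = "I" from by decide,
        show pvN2L.getD "2" "" = "Z" from by decide, show pvN2L.getD "4" "" = "A" from by decide,
        show pvN2L.getD "5" "" = "S" from by decide, show pvN2L.getD "6" "" = "G" from by decide,
        show pvN2L.getD "8" "" = "B" from by decide, show pvN2L.getD "<" "" = " " from by decide]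
    rw [str_replace_single _ "0" "O" '0' 'O' (by decide) (by decide),
        str_replace_single _ "1" "I" '1' 'I' (by decide) (by decide),
        str_replace_single _ "2" "Z" '2' 'Z' (by decide) (by decide),
        str_replace_single _ "4" "A" '4' 'A' (by decide) (by decide),
        str_replace_single _ "5" "S" '5' 'S' (by decide) (by decide),
        str_replace_single _ "6" "G" '6' 'G' (by decide) (by decide),
        str_replace_single _ "8" "B" '8' 'B' (by decide) (by decide),
        str_replace_single _ "<" " " '<' ' ' (by decide) (by decide)]
    simp only [String.toList_ofList, List.map_map]
    refine congrArg String.ofList (List.map_congr_left ?_)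
    intro c _
    by_cases h1 : c = '0'; · subst h1; decide
    by_cases h2 : c = '1'; · subst h2; decide
    by_cases h3 : c = '2'; · subst h3; decide
    by_cases h4 : c = '4'; · subst h4; decide
    by_cases h5 : c = '5'; · subst h5; decide
    by_cases h6 : c = '6'; · subst h6; decide
    by_cases h7 : c = '8'; · subst h7; decide
    by_cases h8 : c = '<'; · subst h8; decide
    have hm : pvN2Lc = PySem.Dict.mk [('0','O'),('1','I'),('2','Z'),('4','A'),('5','S'),('6','G'),('8','B'),('<',' ')] := by decide
    simp [h1, h2, h3, h4, h5, h6, h7, h8, hm, PySem.Dict.getD, PySem.Dict.get?,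
      Ne.symm h1, Ne.symm h2, Ne.symm h3, Ne.symm h4, Ne.symm h5, Ne.symm h6,
      Ne.symm h7, Ne.symm h8]
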